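-- pv_equiv track=rewrite | github.com/dusterbloom/localcat | server/components/extraction/tiered_extractor.py | _parse_markdown_result
-- ===== SOURCE A (Python) =====
-- from typing import List, Tuple, Dict, Any, Optional
--
-- def _parse_markdown_result(markdown_text: str) -> Tuple[List[str], List[Tuple[str, str, str]]]:
--     """Parse markdown result from Tier 3 LLM"""
--     entities = []
--     relationships = []
--
--     lines = markdown_text.split('\n')
--     current_section = None
--
--     for line in lines:
--         line = line.strip()
--
--         # Section headers
--         if line.startswith('## Entities') or line.startswith('**Entities'):
--             current_section = 'entities'
--             continue
--         elif line.startswith('## Relationships') or line.startswith('**Relationships'):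
--             current_section = 'relationships'
--             continue
--
--         # Parse entities
--         if current_section == 'entities' and line.startswith('-'):
--             # Format: - Name (Type) or - Name
--             entity_text = line[1:].strip()
--             if '(' in entity_text:
--                 entity_name = entity_text.split('(')[0].strip()
--             else:
--                 entity_name = entity_text
--             if entity_name:
--                 entities.append(entity_name.lower())
--
--         # Parse relationships
--         elif current_section == 'relationships' and '->' in line:
--             # Format: - Source -> Relation -> Target
--             line = line.lstrip('- *')
--             parts = line.split('->')
--             if len(parts) >= 3:
--                 source = parts[0].strip().lower()
--                 relation = parts[1].strip().lower()
--                 target = parts[2].strip().lower()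
--                 if source and relation and target:
--                     relationships.append((source, relation, target))
--
--     return entities, relationships
-- ===== SOURCE B (Python) =====
-- def _parse_markdown_result(markdown_text):
--     """Parse markdown result from Tier 3 LLM.
--
--     Two-phase decomposition: first partition the stripped lines into the
--     entity-section and relationship-section lines (one pass), then parse
--     each group separately.
--     """
--     ent_lines = []
--     rel_lines = []
--     bucket = None
--     for raw in markdown_text.split('\n'):
--         line = raw.strip()
--         if line.startswith('## Entities') or line.startswith('**Entities'):
--             bucket = ent_lines
--         elif line.startswith('## Relationships') or line.startswith('**Relationships'):
--             bucket = rel_lines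
--         elif bucket is not None:
--             bucket.append(line)
--
--     entities = []
--     for line in ent_lines:
--         if line.startswith('-'):
--             text = line[1:].strip()
--             name = text.split('(')[0].strip() if '(' in text else text
--             if name:
--                 entities.append(name.lower())
--
--     relationships = []
--     for line in rel_lines:
--         if '->' in line:
--             parts = line.lstrip('- *').split('->')
--             if len(parts) >= 3:
--                 source = parts[0].strip().lower()
--                 relation = parts[1].strip().lower()
--                 target = parts[2].strip().lower()
--                 if source and relation and target:
--                     relationships.append((source, relation, target))
--
--     return entities, relationships
-- ===== Notes on version B (the rewrite author's own statement) =====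
-- stated objective: alternative
-- what changed: Single interleaved state-machine loop replaced by a two-phase decomposition: one pass groups content lines by section, then two independent passes parse entity lines and relationship lines.
import Mathlib
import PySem

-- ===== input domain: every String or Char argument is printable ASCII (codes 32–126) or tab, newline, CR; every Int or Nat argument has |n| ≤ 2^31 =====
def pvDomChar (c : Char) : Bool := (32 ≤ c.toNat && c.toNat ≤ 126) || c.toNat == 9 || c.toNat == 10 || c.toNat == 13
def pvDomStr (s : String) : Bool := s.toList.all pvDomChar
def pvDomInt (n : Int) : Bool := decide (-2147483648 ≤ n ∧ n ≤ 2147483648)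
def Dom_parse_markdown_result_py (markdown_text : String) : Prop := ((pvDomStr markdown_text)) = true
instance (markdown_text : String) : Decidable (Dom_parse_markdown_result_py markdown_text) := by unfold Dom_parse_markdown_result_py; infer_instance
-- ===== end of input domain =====

-- B replaces A's single interleaved state-machine loop by a two-phase decomposition
-- (group lines by section, then parse each group); same cost, alternative structure.


-- ===== PORT A =====

-- hand port of Python str.lstrip(chars): drop leading characters that occur in `chars`
-- (exact: CPython removes the longest prefix of characters contained in the set).
def pmLstrip (s : String) (chars : String) : String :=
  String.ofList (s.toList.dropWhile (fun c => chars.toList.contains c))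

-- the body of A's `for line in lines` loop, on state (entities, relationships, current_section)
def pmAStep (st : List String × List (String × String × String) × Option String)
    (raw : String) : List String × List (String × String × String) × Option String :=
  let ents := st.1; let rels := st.2.1; let cur := st.2.2
  let line := PySem.Str.strip raw
  if PySem.Str.startswith line "## Entities" || PySem.Str.startswith line "**Entities" then
    (ents, rels, some "entities")
  else if PySem.Str.startswith line "## Relationships" || PySem.Str.startswith line "**Relationships" then
    (ents, rels, some "relationships")
  else if cur == some "entities" && PySem.Str.startswith line "-" then
    let entity_text := PySem.Str.strip (PySem.Str.slice line (some 1) none)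
    let entity_name :=
      if PySem.Str.isIn "(" entity_text then
        -- split('(')[0]: sep ≠ "" so split? is `some` and the list is nonempty; headD is exact
        PySem.Str.strip (((PySem.Str.split? entity_text "(").getD []).headD "")
      else entity_text
    if entity_name ≠ "" then (ents ++ [PySem.Str.lower entity_name], rels, cur)
    else (ents, rels, cur)
  else if cur == some "relationships" && PySem.Str.isIn "->" line then
    let line2 := pmLstrip line "- *"
    let parts := (PySem.Str.split? line2 "->").getD []   -- sep ≠ "" so always `some`
    if parts.length ≥ 3 then
      let source := PySem.Str.lower (PySem.Str.strip (parts.headD ""))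
      let relation := PySem.Str.lower (PySem.Str.strip (parts.getD 1 ""))
      let target := PySem.Str.lower (PySem.Str.strip (parts.getD 2 ""))
      if source ≠ "" && relation ≠ "" && target ≠ "" then
        (ents, rels ++ [(source, relation, target)], cur)
      else (ents, rels, cur)
    else (ents, rels, cur)
  else (ents, rels, cur)

def parse_markdown_result_py (markdown_text : String) :
    List String × (List (String × String × String)) :=
  let lines := (PySem.Str.split? markdown_text "\n").getD []   -- sep ≠ "" so always `some`
  let r := lines.foldl pmAStep ([], [], none)
  (r.1, r.2.1)

-- ===== PORT B =====

-- B pass 1: the body of the grouping loop, on state (ent_lines, rel_lines, bucket)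
-- (bucket: some true = entities, some false = relationships, none = before any header)
def pmBStep (st : List String × List String × Option Bool)
    (raw : String) : List String × List String × Option Bool :=
  let el := st.1; let rl := st.2.1; let b := st.2.2
  let line := PySem.Str.strip raw
  if PySem.Str.startswith line "## Entities" || PySem.Str.startswith line "**Entities" then
    (el, rl, some true)
  else if PySem.Str.startswith line "## Relationships" || PySem.Str.startswith line "**Relationships" then
    (el, rl, some false)
  else
    match b with
    | some true => (el ++ [line], rl, b)
    | some false => (el, rl ++ [line], b)
    | none => (el, rl, b)

-- B pass 2a: parse one entity-section line
def pmEntLine (acc : List String) (line : String) : List String :=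
  if PySem.Str.startswith line "-" then
    let text := PySem.Str.strip (PySem.Str.slice line (some 1) none)
    let name :=
      if PySem.Str.isIn "(" text then
        PySem.Str.strip (((PySem.Str.split? text "(").getD []).headD "")
      else text
    if name ≠ "" then acc ++ [PySem.Str.lower name] else acc
  else acc

-- B pass 2b: parse one relationship-section line
def pmRelLine (acc : List (String × String × String)) (line : String) :
    List (String × String × String) :=
  if PySem.Str.isIn "->" line then
    let parts := (PySem.Str.split? (pmLstrip line "- *") "->").getD []
    if parts.length ≥ 3 then
      let source := PySem.Str.lower (PySem.Str.strip (parts.headD ""))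
      let relation := PySem.Str.lower (PySem.Str.strip (parts.getD 1 ""))
      let target := PySem.Str.lower (PySem.Str.strip (parts.getD 2 ""))
      if source ≠ "" && relation ≠ "" && target ≠ "" then acc ++ [(source, relation, target)]
      else acc
    else acc
  else acc

def parse_markdown_result_py_alt (markdown_text : String) :
    List String × (List (String × String × String)) :=
  let p := ((PySem.Str.split? markdown_text "\n").getD []).foldl pmBStep ([], [], none)
  (List.foldl pmEntLine [] p.1, List.foldl pmRelLine [] p.2.1)

-- ===== PRECONDITION & SPEC =====
def Spec_parse_markdown_result_py (markdown_text : String) (out : List String × (List (String × String × String))) : Prop := out = parse_markdown_result_py_alt markdown_text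
instance (markdown_text : String) (out : List String × (List (String × String × String))) : Decidable (Spec_parse_markdown_result_py markdown_text out) := by unfold Spec_parse_markdown_result_py; infer_instance

-- ===== CLAIM (what is proved, stated in full; the proofs are below) =====
def Claim_equal_parse_markdown_result_py : Prop := ∀ (markdown_text : String), Dom_parse_markdown_result_py markdown_text → Spec_parse_markdown_result_py markdown_text (parse_markdown_result_py markdown_text)

-- ===== LEMMAS AND PROOFS =====

-- section marker used to relate A's string-valued current_section to B's bucket
def pmSec : Option Bool → Option String
  | none => none
  | some true => some "entities"
  | some false => some "relationships"

-- a fold whose step only appends to its accumulator distributes over the accumulator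
theorem pm_foldl_shift {α β : Type} (f : List β → α → List β)
    (h : ∀ a x, f a x = a ++ f [] x) :
    ∀ (xs : List α) (a : List β), List.foldl f a xs = a ++ List.foldl f [] xs := by
  intro xs
  induction xs with
  | nil => intro a; simp
  | cons x xs ih =>
    intro a
    simp only [List.foldl_cons]
    rw [ih (f a x), h a x, ih (f [] x), List.append_assoc]

theorem pmEntLine_shift (a : List String) (x : String) :
    pmEntLine a x = a ++ pmEntLine [] x := by
  simp only [pmEntLine]; split_ifs <;> simp

theorem pmRelLine_shift (a : List (String × String × String)) (x : String) :
    pmRelLine a x = a ++ pmRelLine [] x := by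
  simp only [pmRelLine]; split_ifs <;> simp

theorem pmBStep_shift (el : List String) (rl : List String) (b : Option Bool) (raw : String) :
    pmBStep (el, rl, b) raw
      = (el ++ (pmBStep ([], [], b) raw).1,
         rl ++ (pmBStep ([], [], b) raw).2.1,
         (pmBStep ([], [], b) raw).2.2) := by
  simp only [pmBStep]
  split_ifs <;> rcases b with _ | _ | _ <;> simp

theorem pmB_foldl_shift : ∀ (lines : List String) (el rl : List String) (b : Option Bool),
    List.foldl pmBStep (el, rl, b) lines
      = (el ++ (List.foldl pmBStep ([], [], b) lines).1,
         rl ++ (List.foldl pmBStep ([], [], b) lines).2.1,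
         (List.foldl pmBStep ([], [], b) lines).2.2) := by
  intro lines
  induction lines with
  | nil => intro el rl b; simp
  | cons l ls ih =>
    intro el rl b
    simp only [List.foldl_cons]
    rw [pmBStep_shift el rl b l]
    rcases h : pmBStep ([], [], b) l with ⟨u, v, b'⟩
    rw [ih (el ++ u) (rl ++ v) b', ih u v b']
    simp [List.append_assoc]

-- one step of A equals B's grouping step followed by B's per-line parsers
theorem pm_step (E : List String) (R : List (String × String × String))
    (b : Option Bool) (l : String) :
    pmAStep (E, R, pmSec b) l
      = (List.foldl pmEntLine E (pmBStep ([], [], b) l).1,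
         List.foldl pmRelLine R (pmBStep ([], [], b) l).2.1,
         pmSec (pmBStep ([], [], b) l).2.2) := by
  rcases b with _ | _ | _ <;>
    simp only [pmAStep, pmBStep, pmSec] <;>
    split_ifs <;> simp_all [pmEntLine, pmRelLine]
  decide

theorem pm_main : ∀ (lines : List String) (E : List String)
    (R : List (String × String × String)) (b : Option Bool),
    List.foldl pmAStep (E, R, pmSec b) lines
      = (E ++ List.foldl pmEntLine [] (List.foldl pmBStep ([], [], b) lines).1,
         R ++ List.foldl pmRelLine [] (List.foldl pmBStep ([], [], b) lines).2.1,
         pmSec (List.foldl pmBStep ([], [], b) lines).2.2) := by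
  intro lines
  induction lines with
  | nil => intro E R b; simp
  | cons l ls ih =>
    intro E R b
    simp only [List.foldl_cons]
    rw [pm_step E R b l]
    rcases h : pmBStep ([], [], b) l with ⟨u, v, b'⟩
    rw [ih (List.foldl pmEntLine E u) (List.foldl pmRelLine R v) b',
        pmB_foldl_shift ls u v b']
    rcases hw : List.foldl pmBStep ([], [], b') ls with ⟨w1, w2, b''⟩
    simp only [Prod.mk.injEq, and_true]
    refine ⟨?_, ?_⟩
    · rw [pm_foldl_shift pmEntLine pmEntLine_shift u E,
          List.foldl_append, pm_foldl_shift pmEntLine pmEntLine_shift w1 (List.foldl pmEntLine [] u),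
          List.append_assoc]
    · rw [pm_foldl_shift pmRelLine pmRelLine_shift v R,
          List.foldl_append, pm_foldl_shift pmRelLine pmRelLine_shift w2 (List.foldl pmRelLine [] v),
          List.append_assoc]

-- ===== VERDICT (by name: the statement is the Claim_ definition above) =====
theorem parse_markdown_result_py_spec : Claim_equal_parse_markdown_result_py := by
  intro t _
  unfold Spec_parse_markdown_result_py parse_markdown_result_py parse_markdown_result_py_alt
  have h := pm_main ((PySem.Str.split? t "\n").getD []) [] [] none
  simp only [pmSec, List.nil_append] at h
  dsimp only
  rw [h]
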